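-- pv_equiv track=rewrite | github.com/smartFox-Rohan-Kulkarni/ProblemSolving | level_palindrome.py | findLevel
-- ===== SOURCE A (Python) =====
-- def findLevel(data):
--     length_data=len(data)
--     level_cnt=0
--     if length_data==0:
--         return level_cnt
--     #if length_data==1:
--
--     ele_front=0
--     ele_end=length_data-1
--
--     while ele_front<=ele_end:
--         if not(data[ele_front]==data[ele_end]):
--             break
--         level_cnt+=1
--         ele_front+=1
--         ele_end-=1
--     return level_cnt
-- ===== SOURCE B (Python) =====
-- def findLevel(data):
--     level = 0
--     while data and data[0] == data[-1]:
--         level += 1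
--         data = data[1:-1]
--     return level
-- ===== Notes on version B (the rewrite author's own statement) =====
-- stated objective: alternative
-- what changed: Replaces the two-pointer index walk with an onion-peeling loop that, while the outer characters match, strips them off by rebinding data to the slice data[1:-1]; the state is the shrinking substring itself, no indices are kept.
import Mathlib
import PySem

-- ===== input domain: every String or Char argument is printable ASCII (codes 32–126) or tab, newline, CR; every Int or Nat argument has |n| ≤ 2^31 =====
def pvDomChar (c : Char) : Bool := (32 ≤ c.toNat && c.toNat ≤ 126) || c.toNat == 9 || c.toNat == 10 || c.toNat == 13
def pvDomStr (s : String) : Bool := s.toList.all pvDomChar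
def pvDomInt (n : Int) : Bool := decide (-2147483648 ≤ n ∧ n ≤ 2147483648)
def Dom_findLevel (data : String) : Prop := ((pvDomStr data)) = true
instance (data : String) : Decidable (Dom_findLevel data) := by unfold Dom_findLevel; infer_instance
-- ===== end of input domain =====

-- B replaces A's inward two-pointer index walk by an onion-peeling loop whose state is the
-- shrinking substring itself: while the outer characters match, strip them with data[1:-1]
-- (alternative decomposition; no index arithmetic).


-- ===== PORT A =====
-- the while-loop of A, state = (ele_front, ele_end, level_cnt)
def findLevelLoop (s : List Char) (front back cnt : Int) : Int :=
  if _h : front ≤ back then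
    if PySem.List.pyGet? s front = PySem.List.pyGet? s back then
      findLevelLoop s (front + 1) (back - 1) (cnt + 1)
    else cnt
  else cnt
termination_by (back + 1 - front).toNat
decreasing_by omega

def findLevel (data : String) : Int :=
  if PySem.List.len data.toList = 0 then 0
  else findLevelLoop data.toList 0 (PySem.List.len data.toList - 1) 0

-- ===== PORT B =====
-- B's while-loop: state = (current substring, level); peel data[1:-1] while ends match.
-- fuel = length + 1 only makes the recursion structural; it is never exhausted
-- (each peel strictly shrinks the list: lemma slice_len_lt below).
def altLoop : Nat → List Char → Int → Int
  | 0, _, level => level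
  | fuel + 1, s, level =>
    if s ≠ [] ∧ PySem.List.pyGet? s 0 = PySem.List.pyGet? s (-1) then
      altLoop fuel (PySem.List.slice s (some 1) (some (-1))) (level + 1)
    else level

def findLevel_alt (data : String) : Int := altLoop (data.toList.length + 1) data.toList 0

-- ===== PRECONDITION & SPEC =====
def Spec_findLevel (data : String) (out : Int) : Prop := out = findLevel_alt data
instance (data : String) (out : Int) : Decidable (Spec_findLevel data out) := by unfold Spec_findLevel; infer_instance

-- ===== CLAIM (what is proved, stated in full; the proofs are below) =====
def Claim_equal_findLevel : Prop := ∀ (data : String), Dom_findLevel data → Spec_findLevel data (findLevel data)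

-- ===== LEMMAS AND PROOFS =====

-- length of data[1:-1] is smaller: justifies the fuel bound (cited by the proofs below)
lemma slice_len_lt (s : List Char) (h : s ≠ []) :
    (PySem.List.slice s (some 1) (some (-1))).length < s.length := by
  have := PySem.List.length_slice s (1 : Int) (-1)
  rw [PySem.List.clampIdx_neg_one] at this
  have hne : s.length ≠ 0 := by simp [List.length_eq_zero_iff, h]
  have h1 : PySem.List.clampIdx s.length (1 : Int) = min 1 s.length := by
    rw [show (1 : Int) = ((1 : Nat) : Int) from rfl, PySem.List.clampIdx_natCast]
  omega


-- A's whole body, on lists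
def fa (s : List Char) : Int :=
  if (PySem.List.len s) = 0 then 0 else findLevelLoop s 0 (PySem.List.len s - 1) 0

lemma findLevelLoop_cnt (s : List Char) (f b cnt : Int) :
    ∀ c : Int, findLevelLoop s f b c = c + findLevelLoop s f b 0 := by
  induction f, b, cnt using findLevelLoop.induct s with
  | case1 f b cnt hle heq ih =>
    intro c
    conv_lhs => rw [findLevelLoop]
    conv_rhs => rw [findLevelLoop]
    simp only [dif_pos hle, if_pos heq]
    rw [ih (c + 1), ih (0 + 1)]
    ring
  | case2 f b cnt hle hne =>
    intro c
    conv_lhs => rw [findLevelLoop]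
    conv_rhs => rw [findLevelLoop]
    simp only [dif_pos hle, if_neg hne]
    ring
  | case3 f b cnt hle =>
    intro c
    conv_lhs => rw [findLevelLoop]
    conv_rhs => rw [findLevelLoop]
    simp only [dif_neg hle]
    ring

-- index translation: inside c :: mid ++ [d], position i with 1 ≤ i ≤ |mid| reads mid[i-1]
lemma pyGet_sandwich (c d : Char) (mid : List Char) (i : Int)
    (h1 : 1 ≤ i) (h2 : i ≤ (mid.length : Int)) :
    PySem.List.pyGet? (c :: mid ++ [d]) i = PySem.List.pyGet? mid (i - 1) := by
  rw [PySem.List.pyGet?_of_nonneg _ (by omega : (0:Int) ≤ i),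
      PySem.List.pyGet?_of_nonneg _ (by omega : (0:Int) ≤ i - 1)]
  have hi : i.toNat = (i - 1).toNat + 1 := by omega
  rw [hi]
  simp only [List.cons_append, List.getElem?_cons_succ]
  rw [List.getElem?_append_left (by omega)]

-- A's loop on the sandwich, pointers strictly inside, equals the loop on mid shifted by one
lemma findLevelLoop_sandwich (c d : Char) (mid : List Char) :
    ∀ (f b cnt : Int), 1 ≤ f → b ≤ (mid.length : Int) →
      findLevelLoop (c :: mid ++ [d]) f b cnt = findLevelLoop mid (f - 1) (b - 1) cnt := by
  intro f0 b0 cnt0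
  induction f0, b0, cnt0 using findLevelLoop.induct (c :: mid ++ [d]) with
  | case1 f b cnt hle heq ih =>
    intro hf hb
    have hget_f := pyGet_sandwich c d mid f (by omega) (by omega)
    have hget_b := pyGet_sandwich c d mid b (by omega) (by omega)
    rw [hget_f, hget_b] at heq
    conv_lhs => rw [findLevelLoop]
    conv_rhs => rw [findLevelLoop]
    simp only [dif_pos hle, dif_pos (show f - 1 ≤ b - 1 by omega), if_pos heq,
      if_pos (hget_f ▸ hget_b ▸ heq)]
    rw [ih (by omega) (by omega)]
    congr 1; ring
  | case2 f b cnt hle hne =>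
    intro hf hb
    have hget_f := pyGet_sandwich c d mid f (by omega) (by omega)
    have hget_b := pyGet_sandwich c d mid b (by omega) (by omega)
    rw [hget_f, hget_b] at hne
    conv_lhs => rw [findLevelLoop]
    conv_rhs => rw [findLevelLoop]
    simp only [dif_pos hle, dif_pos (show f - 1 ≤ b - 1 by omega), if_neg hne,
      if_neg (hget_f ▸ hget_b ▸ hne)]
  | case3 f b cnt hle =>
    intro hf hb
    conv_lhs => rw [findLevelLoop]
    conv_rhs => rw [findLevelLoop]
    simp only [dif_neg hle, dif_neg (show ¬ (f - 1 ≤ b - 1) by omega)]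

-- A peels one layer off the sandwich
lemma fa_sandwich (c d : Char) (mid : List Char) :
    fa (c :: mid ++ [d]) = if c = d then 1 + fa mid else 0 := by
  have hlen : PySem.List.len (c :: mid ++ [d]) = (mid.length : Int) + 2 := by
    simp [PySem.List.len_eq]; omega
  have hfirst : PySem.List.pyGet? (c :: mid ++ [d]) 0 = some c := by
    simp [PySem.List.pyGet?_zero_cons]
  have hlast : PySem.List.pyGet? (c :: mid ++ [d]) ((mid.length : Int) + 1) = some d := by
    rw [show ((mid.length : Int) + 1) = ((mid.length + 1 : Nat) : Int) by push_cast; ring,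
      PySem.List.pyGet?_natCast]
    simp
  unfold fa
  rw [hlen]
  simp only [show ¬ ((mid.length : Int) + 2 = 0) by omega, if_false]
  conv_lhs => rw [findLevelLoop]
  simp only [show (mid.length : Int) + 2 - 1 = (mid.length : Int) + 1 by ring,
    dif_pos (show (0:Int) ≤ (mid.length : Int) + 1 by omega), hfirst, hlast]
  by_cases hcd : c = d
  · simp only [Option.some.injEq, if_pos hcd]
    norm_num
    rw [← List.cons_append]
    rw [findLevelLoop_cnt (c :: mid ++ [d]) 1 (mid.length : Int) 0 1]
    congr 1
    rw [findLevelLoop_sandwich c d mid 1 (mid.length : Int) 0 (by omega) (by omega)]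
    norm_num
    intro hm
    subst hm
    rw [findLevelLoop]
    norm_num
  · simp only [if_neg (fun h => hcd (Option.some.injEq c d ▸ h)), if_neg hcd]

-- data[1:-1] of the sandwich is exactly mid
lemma slice_sandwich (c d : Char) (mid : List Char) :
    PySem.List.slice (c :: mid ++ [d]) (some 1) (some (-1)) = mid := by
  simp [PySem.List.slice]

-- B's loop shifts its accumulator
lemma altLoop_cnt (fuel : Nat) : ∀ (s : List Char) (c : Int),
    altLoop fuel s c = c + altLoop fuel s 0 := by
  induction fuel with
  | zero => intro s c; simp [altLoop]
  | succ fuel ih =>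
    intro s c
    rw [altLoop]
    conv_rhs => rw [altLoop]
    by_cases h : (s ≠ [] ∧ PySem.List.pyGet? s 0 = PySem.List.pyGet? s (-1))
    · simp only [if_pos h]
      rw [ih _ (c + 1), ih _ (0 + 1)]
      ring
    · simp only [if_neg h]
      ring

-- with enough fuel the result does not depend on the fuel
lemma altLoop_fuel (n : Nat) : ∀ (s : List Char) (f1 f2 : Nat) (lv : Int),
    s.length ≤ n → s.length < f1 → s.length < f2 →
    altLoop f1 s lv = altLoop f2 s lv := by
  induction n with
  | zero =>
    intro s f1 f2 lv hn h1 h2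
    have hs : s = [] := by cases s <;> simp_all
    subst hs
    obtain ⟨g1, rfl⟩ := Nat.exists_eq_succ_of_ne_zero (by omega : f1 ≠ 0)
    obtain ⟨g2, rfl⟩ := Nat.exists_eq_succ_of_ne_zero (by omega : f2 ≠ 0)
    simp [altLoop]
  | succ n ih =>
    intro s f1 f2 lv hn h1 h2
    obtain ⟨g1, rfl⟩ := Nat.exists_eq_succ_of_ne_zero (by omega : f1 ≠ 0)
    obtain ⟨g2, rfl⟩ := Nat.exists_eq_succ_of_ne_zero (by omega : f2 ≠ 0)
    rw [altLoop]
    conv_rhs => rw [altLoop]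
    by_cases h : (s ≠ [] ∧ PySem.List.pyGet? s 0 = PySem.List.pyGet? s (-1))
    · simp only [if_pos h]
      have hlt := slice_len_lt s h.1
      exact ih _ g1 g2 (lv + 1) (by omega) (by omega) (by omega)
    · simp only [if_neg h]

-- B's whole body; peeling equations
def fb (s : List Char) : Int := altLoop (s.length + 1) s 0

lemma fb_nil : fb ([] : List Char) = 0 := by
  unfold fb
  simp [altLoop]

lemma fb_single (c : Char) : fb [c] = 1 := by
  have h1 : PySem.List.slice [c] (some 1) (some (-1)) = ([] : List Char) := by
    simp [PySem.List.slice]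
  unfold fb
  rw [altLoop, if_pos ⟨by simp,
    by rw [PySem.List.pyGet?_zero_cons, PySem.List.pyGet?_neg_one]; simp⟩, h1]
  simp [altLoop]

lemma fb_sandwich (c d : Char) (mid : List Char) :
    fb (c :: mid ++ [d]) = if c = d then 1 + fb mid else 0 := by
  unfold fb
  rw [altLoop]
  have hfirst : PySem.List.pyGet? (c :: mid ++ [d]) 0 = some c := by
    simp [PySem.List.pyGet?_zero_cons]
  have hlast : PySem.List.pyGet? (c :: mid ++ [d]) (-1) = some d := by
    rw [PySem.List.pyGet?_neg_one, List.getLast?_concat]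
  by_cases hcd : c = d
  · have hcond : (c :: mid ++ [d] ≠ [] ∧
        PySem.List.pyGet? (c :: mid ++ [d]) 0 = PySem.List.pyGet? (c :: mid ++ [d]) (-1)) := by
      refine ⟨by simp, ?_⟩
      rw [hfirst, hlast, hcd]
    rw [if_pos hcond, slice_sandwich, if_pos hcd]
    have hlen : (c :: mid ++ [d]).length = mid.length + 2 := by simp
    rw [hlen]
    show altLoop (mid.length + 2) mid 1 = 1 + altLoop (mid.length + 1) mid 0
    rw [altLoop_fuel mid.length mid (mid.length + 2) (mid.length + 1) 1 le_rfl (by omega) (by omega)]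
    rw [altLoop_cnt (mid.length + 1) mid 1]
  · have hcond : ¬ (c :: mid ++ [d] ≠ [] ∧
        PySem.List.pyGet? (c :: mid ++ [d]) 0 = PySem.List.pyGet? (c :: mid ++ [d]) (-1)) := by
      rintro ⟨-, h⟩
      rw [hfirst, hlast] at h
      exact hcd (Option.some.injEq c d ▸ h)
    rw [if_neg hcond, if_neg hcd]

lemma fa_eq_fb : ∀ (n : Nat) (s : List Char), s.length ≤ n → fa s = fb s := by
  intro n
  induction n with
  | zero =>
    intro s h
    have : s = [] := by cases s <;> simp_all
    subst this
    rw [fb_nil]; decide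
  | succ n ih =>
    intro s h
    rcases s with _ | ⟨c, t⟩
    · rw [fb_nil]; decide
    · rcases t.eq_nil_or_concat' with rfl | ⟨mid, d, rfl⟩
      · rw [fb_single]
        unfold fa
        rw [findLevelLoop]
        simp [PySem.List.len_eq, findLevelLoop]
      · have hlen : mid.length ≤ n := by
          simp only [List.length_cons, List.length_append] at h
          omega
        rw [← List.cons_append, fa_sandwich c d mid, fb_sandwich c d mid, ih mid hlen]

-- ===== VERDICT (by name: the statement is the Claim_ definition above) =====
theorem findLevel_spec : Claim_equal_findLevel := by
  intro data _
  show findLevel data = findLevel_alt data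
  unfold findLevel findLevel_alt
  have := fa_eq_fb data.toList.length data.toList le_rfl
  unfold fa fb at this
  by_cases h : PySem.List.len data.toList = 0
  · rw [if_pos h]
    rw [if_pos h] at this
    exact this
  · rw [if_neg h]
    rw [if_neg h] at this
    exact this
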